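-- pv_equiv track=rewrite | github.com/phosphor-works/phosphor-works.github.io | scripts/dbus-to-doxygen.py | sig_to_human
-- ===== SOURCE A (Python) =====
-- DBUS_SIG_NAMES = {
--     "y": "byte",       "b": "bool",       "n": "int16",
--     "q": "uint16",     "i": "int32",      "u": "uint32",
--     "x": "int64",      "t": "uint64",     "d": "double",
--     "s": "string",     "o": "object_path", "g": "signature",
--     "v": "variant",    "h": "unix_fd",
-- }
--
-- def sig_to_human(sig: str) -> str:
--     """Turn a D-Bus type signature into a best-effort human-readable form.
--
--     Examples:
--         s           → string
--         as          → array<string>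
--         a{sv}       → dict<string,variant>
--         (sii)       → struct(string,int32,int32)
--         a(sv)       → array<struct(string,variant)>
--     """
--     if not sig:
--         return ""
--
--     def decode(chars, i):
--         if i >= len(chars):
--             return "", i
--         c = chars[i]
--         if c == "a":
--             inner, j = decode(chars, i + 1)
--             if inner.startswith("dict-entry{"):
--                 # a{...} → dict
--                 return f"dict<{inner[len('dict-entry{'):-1]}>", j
--             return f"array<{inner}>", j
--         if c == "(":
--             parts = []
--             j = i + 1
--             while j < len(chars) and chars[j] != ")":
--                 item, j = decode(chars, j)
--                 parts.append(item)
--             return f"struct({','.join(parts)})", j + 1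
--         if c == "{":
--             # dict-entry {kt vt}
--             parts = []
--             j = i + 1
--             while j < len(chars) and chars[j] != "}":
--                 item, j = decode(chars, j)
--                 parts.append(item)
--             return f"dict-entry{{{','.join(parts)}}}", j + 1
--         return DBUS_SIG_NAMES.get(c, c), i + 1
--
--     human, _ = decode(sig, 0)
--     return human
-- ===== SOURCE B (Python) =====
-- DBUS_SIG_NAMES = {
--     "y": "byte",       "b": "bool",       "n": "int16",
--     "q": "uint16",     "i": "int32",      "u": "uint32",
--     "x": "int64",      "t": "uint64",     "d": "double",
--     "s": "string",     "o": "object_path", "g": "signature",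
--     "v": "variant",    "h": "unix_fd",
-- }
--
-- def _wrap(val):
--     """Resolve one completed 'a' frame: a{..} becomes dict<..>, else array<..>."""
--     if val.startswith("dict-entry{"):
--         return "dict<" + val[len("dict-entry{"):-1] + ">"
--     return "array<" + val + ">"
--
--
-- def sig_to_human(sig: str) -> str:
--     """Iterative version: one left-to-right scan with an explicit stack of open
--     frames (kind, parts).  Stops after the first complete top-level type."""
--     if not sig:
--         return ""
--     stack = []  # frames: [kind, parts]; kind in 'a', '(', '{'
--
--     def fold(val):
--         # fold a completed value through pending 'a' frames, then attach it to
--         # the enclosing group frame, or report it as the finished result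
--         while stack and stack[-1][0] == "a":
--             stack.pop()
--             val = _wrap(val)
--         if stack:
--             stack[-1][1].append(val)
--             return None
--         return val
--
--     for c in sig:
--         top = stack[-1][0] if stack else None
--         if (top == "(" and c == ")") or (top == "{" and c == "}"):
--             kind, parts = stack.pop()
--             body = ",".join(parts)
--             done = fold("struct(" + body + ")" if kind == "(" else
--                         "dict-entry{" + body + "}")
--         elif c in ("a", "(", "{"):
--             stack.append([c, []])
--             done = None
--         else:
--             done = fold(DBUS_SIG_NAMES.get(c, c))
--         if done is not None:
--             return done
--
--     # input exhausted with frames still open: close them innermost-first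
--     val = None
--     while stack:
--         kind, parts = stack.pop()
--         if kind == "a":
--             val = _wrap(val if val is not None else "")
--         else:
--             if val is not None:
--                 parts.append(val)
--             body = ",".join(parts)
--             val = "struct(" + body + ")" if kind == "(" else "dict-entry{" + body + "}"
--     return val if val is not None else ""
-- ===== Notes on version B (the rewrite author's own statement) =====
-- stated objective: alternative
-- what changed: A's recursive-descent decoder (mutually recursive decode with index returns) is replaced by a single iterative left-to-right scan that maintains an explicit stack of open array/struct/dict-entry frames with their accumulated parts, folding a frame into its parent when it completes and returning as soon as the first top-level type is finished.
import Mathlib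
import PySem

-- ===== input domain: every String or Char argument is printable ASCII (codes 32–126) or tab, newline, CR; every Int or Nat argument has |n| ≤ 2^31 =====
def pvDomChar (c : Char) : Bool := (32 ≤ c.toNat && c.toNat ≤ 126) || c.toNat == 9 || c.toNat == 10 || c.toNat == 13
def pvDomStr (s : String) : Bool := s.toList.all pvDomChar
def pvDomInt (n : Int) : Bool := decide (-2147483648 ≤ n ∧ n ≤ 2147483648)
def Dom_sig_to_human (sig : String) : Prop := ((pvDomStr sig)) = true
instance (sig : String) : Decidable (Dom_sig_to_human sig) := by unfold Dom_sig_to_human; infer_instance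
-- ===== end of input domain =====

-- B replaces A's recursive-descent decoder by an iterative left-to-right scan
-- with an explicit stack of open frames (objective: alternative decomposition).

-- shared module constant DBUS_SIG_NAMES and its lookup (Python dict.get(c, c))
def DBUS_SIG_NAMES : PySem.Dict Char String := PySem.Dict.ofList
  [('y', "byte"), ('b', "bool"), ('n', "int16"),
   ('q', "uint16"), ('i', "int32"), ('u', "uint32"),
   ('x', "int64"), ('t', "uint64"), ('d', "double"),
   ('s', "string"), ('o', "object_path"), ('g', "signature"),
   ('v', "variant"), ('h', "unix_fd")]

def dName (c : Char) : String := PySem.Dict.getD DBUS_SIG_NAMES c (String.mk [c])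

-- Python's  val[len("dict-entry{"):-1]  =  val[11:-1]; drop 11 then dropLast is
-- exact for every string (both give the chars at positions 11 … len-2).
def strip11 (v : String) : String := String.mk ((v.toList.drop 11).dropLast)

-- ===== PORT A =====
-- decode(chars, i) of A, with a fuel argument standing for the call depth of the
-- Python recursion (2*len+2 is proved sufficient below); loopA is the
-- while-loop shared by the '(' and '{' branches (stop = ')' resp. '}').
mutual
def decodeA (chars : List Char) : Nat → Nat → String × Nat
  | 0, i => ("", i)          -- fuel exhausted; unreachable with the fuel given
  | f+1, i =>
    if h : i < chars.length then
      let c := chars[i]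
      if c = 'a' then
        match decodeA chars f (i+1) with
        | (inner, j) =>
          if PySem.Str.startswith inner "dict-entry{" then
            ("dict<" ++ strip11 inner ++ ">", j)
          else
            ("array<" ++ inner ++ ">", j)
      else if c = '(' then
        match loopA chars ')' f (i+1) with
        | (parts, j) => ("struct(" ++ String.intercalate "," parts ++ ")", j + 1)
      else if c = '{' then
        match loopA chars '}' f (i+1) with
        | (parts, j) => ("dict-entry{" ++ String.intercalate "," parts ++ "}", j + 1)
      else
        (dName c, i + 1)
    else ("", i)

def loopA (chars : List Char) (stop : Char) : Nat → Nat → List String × Nat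
  | 0, j => ([], j)
  | f+1, j =>
    if h : j < chars.length then
      if chars[j] = stop then ([], j)
      else
        match decodeA chars f j with
        | (item, j') =>
          match loopA chars stop f j' with
          | (rest, j'') => (item :: rest, j'')
    else ([], j)
end

def sig_to_human (sig : String) : String :=
  if sig = "" then ""
  else (decodeA sig.toList (2 * sig.toList.length + 2) 0).1

-- ===== PORT B =====
-- Source B: explicit stack of open frames (kind, parts); one left-to-right scan.

-- _wrap of Source B
def wrapB (v : String) : String :=
  if PySem.Str.startswith v "dict-entry{" then "dict<" ++ strip11 v ++ ">"
  else "array<" ++ v ++ ">"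

-- the closing text of a group frame ( "struct(...)" / "dict-entry{...}" )
def groupB (k : Char) (ps : List String) : String :=
  if k = '(' then "struct(" ++ String.intercalate "," ps ++ ")"
  else "dict-entry{" ++ String.intercalate "," ps ++ "}"

-- fold of Source B: resolve pending 'a' frames, then attach to the enclosing group
-- frame (none) or report the finished result (some v)
def foldB : List (Char × List String) → String → Option String × List (Char × List String)
  | [], v => (some v, [])
  | (k, ps) :: rest, v =>
    if k = 'a' then foldB rest (wrapB v)
    else (none, (k, ps ++ [v]) :: rest)

-- the trailing while-loop of Source B: input exhausted, close open frames
def closeEOF : List (Char × List String) → Option String → String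
  | [], v => v.getD ""
  | (k, ps) :: rest, v =>
    if k = 'a' then closeEOF rest (some (wrapB (v.getD "")))
    else closeEOF rest (some (groupB k (ps ++ v.toList)))

-- the main for-loop of Source B
def runB : List Char → List (Char × List String) → String
  | [], st => closeEOF st none
  | c :: cs, (k, ps) :: rest =>
    if (k = '(' ∧ c = ')') ∨ (k = '{' ∧ c = '}') then
      match foldB rest (groupB k ps) with
      | (some r, _) => r
      | (none, st') => runB cs st'
    else if c = 'a' ∨ c = '(' ∨ c = '{' then
      runB cs ((c, []) :: (k, ps) :: rest)
    else
      match foldB ((k, ps) :: rest) (dName c) with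
      | (some r, _) => r
      | (none, st') => runB cs st'
  | c :: cs, [] =>
    if c = 'a' ∨ c = '(' ∨ c = '{' then
      runB cs [(c, [])]
    else
      match foldB [] (dName c) with
      | (some r, _) => r
      | (none, st') => runB cs st'

def sig_to_human_alt (sig : String) : String :=
  if sig = "" then "" else runB sig.toList []

-- ===== PRECONDITION & SPEC =====
def Spec_sig_to_human (sig : String) (out : String) : Prop := out = sig_to_human_alt sig
instance (sig : String) (out : String) : Decidable (Spec_sig_to_human sig out) := by unfold Spec_sig_to_human; infer_instance

-- ===== CLAIM (what is proved, stated in full; the proofs are below) =====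
def Claim_equal_sig_to_human : Prop := ∀ (sig : String), Dom_sig_to_human sig → Spec_sig_to_human sig (sig_to_human sig)

-- ===== LEMMAS AND PROOFS =====

-- continuation of the machine after a complete value v was produced with stack st
def contB (st : List (Char × List String)) (v : String) (cs : List Char) : String :=
  match foldB st v with
  | (some r, _) => r
  | (none, st') => runB cs st'

-- the innermost open frame is an 'a' frame
def topA (st : List (Char × List String)) : Prop :=
  ∃ ps rest, st = ('a', ps) :: rest

-- no frame-closing character under the innermost group frame
def CompatSt (st : List (Char × List String)) (c : Char) : Prop :=
  ∀ k ps rest, st = (k, ps) :: rest → ¬ ((k = '(' ∧ c = ')') ∨ (k = '{' ∧ c = '}'))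

lemma closeEOF_some (st : List (Char × List String)) (v : String) :
    closeEOF st (some v) = contB st v [] := by
  induction st generalizing v with
  | nil => simp [closeEOF, contB, foldB]
  | cons fr rest ih =>
    rcases fr with ⟨k, ps⟩
    by_cases hk : k = 'a'
    · subst hk
      simp [closeEOF, contB, foldB, ih]
    · simp [closeEOF, contB, foldB, hk, runB, Option.toList]

lemma closeEOF_topA (st : List (Char × List String)) (h : topA st) :
    closeEOF st none = contB st "" [] := by
  obtain ⟨ps, rest, rfl⟩ := h
  show closeEOF (('a', ps) :: rest) none = _
  rw [show closeEOF (('a', ps) :: rest) none = closeEOF rest (some (wrapB "")) from by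
    simp [closeEOF]]
  rw [closeEOF_some]
  simp [contB, foldB]

-- equation lemmas for the A-side decoder
lemma decodeA_eof (chars : List Char) (f i : Nat) (hi : chars.length ≤ i) :
    decodeA chars f i = ("", i) := by
  cases f <;> simp [decodeA, Nat.not_lt.mpr hi]

lemma decodeA_a (chars : List Char) (f i : Nat) (hi : i < chars.length)
    (hc : chars[i] = 'a') :
    decodeA chars (f+1) i
      = (wrapB (decodeA chars f (i+1)).1, (decodeA chars f (i+1)).2) := by
  rcases hr : decodeA chars f (i+1) with ⟨inner, j⟩
  simp only [decodeA, dif_pos hi, hc, reduceIte, hr, wrapB]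
  split <;> rfl

lemma decodeA_paren (chars : List Char) (f i : Nat) (hi : i < chars.length)
    (hc : chars[i] = '(') :
    decodeA chars (f+1) i
      = (groupB '(' (loopA chars ')' f (i+1)).1, (loopA chars ')' f (i+1)).2 + 1) := by
  rcases hr : loopA chars ')' f (i+1) with ⟨parts, j⟩
  simp only [decodeA, dif_pos hi, hc, Char.reduceEq, reduceIte, hr, groupB]

lemma decodeA_brace (chars : List Char) (f i : Nat) (hi : i < chars.length)
    (hc : chars[i] = '{') :
    decodeA chars (f+1) i
      = (groupB '{' (loopA chars '}' f (i+1)).1, (loopA chars '}' f (i+1)).2 + 1) := by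
  rcases hr : loopA chars '}' f (i+1) with ⟨parts, j⟩
  simp only [decodeA, dif_pos hi, hc, Char.reduceEq, reduceIte, hr, groupB]

lemma decodeA_plain (chars : List Char) (f i : Nat) (hi : i < chars.length)
    (ha : ¬ chars[i] = 'a') (hp : ¬ chars[i] = '(') (hb : ¬ chars[i] = '{') :
    decodeA chars (f+1) i = (dName chars[i], i + 1) := by
  simp only [decodeA, dif_pos hi, if_neg ha, if_neg hp, if_neg hb]

lemma loopA_eof (chars : List Char) (stop : Char) (f j : Nat) (hj : chars.length ≤ j) :
    loopA chars stop f j = ([], j) := by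
  cases f <;> simp [loopA, Nat.not_lt.mpr hj]

lemma loopA_stop (chars : List Char) (stop : Char) (f j : Nat) (hj : j < chars.length)
    (hs : chars[j] = stop) :
    loopA chars stop (f+1) j = ([], j) := by
  simp only [loopA, dif_pos hj, if_pos hs]

lemma loopA_step (chars : List Char) (stop : Char) (f j : Nat) (hj : j < chars.length)
    (hs : ¬ chars[j] = stop) :
    loopA chars stop (f+1) j
      = ((decodeA chars f j).1 :: (loopA chars stop f (decodeA chars f j).2).1,
         (loopA chars stop f (decodeA chars f j).2).2) := by
  rcases hr : decodeA chars f j with ⟨item, j'⟩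
  rcases hr2 : loopA chars stop f j' with ⟨items, j''⟩
  simp only [loopA, dif_pos hj, if_neg hs, hr, hr2]

-- equation lemmas for the B-side machine
lemma runB_closer (c : Char) (cs : List Char) (k : Char) (ps : List String)
    (rest : List (Char × List String))
    (h : (k = '(' ∧ c = ')') ∨ (k = '{' ∧ c = '}')) :
    runB (c :: cs) ((k, ps) :: rest) = contB rest (groupB k ps) cs := by
  rcases hfb : foldB rest (groupB k ps) with ⟨o, st'⟩
  cases o <;> simp [runB, contB, hfb, if_pos h]

lemma runB_open (c : Char) (cs : List Char) (st : List (Char × List String))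
    (hncl : ∀ k ps rest, st = (k, ps) :: rest → ¬ ((k = '(' ∧ c = ')') ∨ (k = '{' ∧ c = '}')))
    (h : c = 'a' ∨ c = '(' ∨ c = '{') :
    runB (c :: cs) st = runB cs ((c, []) :: st) := by
  cases st with
  | nil => simp [runB, if_pos h]
  | cons fr rest =>
    rcases fr with ⟨k, ps⟩
    simp [runB, if_neg (hncl k ps rest rfl), if_pos h]

lemma runB_plain (c : Char) (cs : List Char) (st : List (Char × List String))
    (hncl : ∀ k ps rest, st = (k, ps) :: rest → ¬ ((k = '(' ∧ c = ')') ∨ (k = '{' ∧ c = '}')))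
    (h : ¬ (c = 'a' ∨ c = '(' ∨ c = '{')) :
    runB (c :: cs) st = contB st (dName c) cs := by
  cases st with
  | nil =>
    rcases hfb : foldB [] (dName c) with ⟨o, st'⟩
    cases o <;> simp [runB, contB, hfb, if_neg h]
  | cons fr rest =>
    rcases fr with ⟨k, ps⟩
    rcases hfb : foldB ((k, ps) :: rest) (dName c) with ⟨o, st'⟩
    cases o <;> simp [runB, contB, hfb, if_neg (hncl k ps rest rfl), if_neg h]

lemma contB_consA (ps : List String) (st : List (Char × List String)) (v : String)
    (cs : List Char) :
    contB (('a', ps) :: st) v cs = contB st (wrapB v) cs := by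
  simp [contB, foldB]

lemma contB_consGroup (k : Char) (hk : ¬ k = 'a') (ps : List String)
    (st : List (Char × List String)) (v : String) (cs : List Char) :
    contB ((k, ps) :: st) v cs = runB cs ((k, ps ++ [v]) :: st) := by
  simp [contB, foldB, hk]

-- index monotonicity of the A-side decoder
lemma monoA (chars : List Char) :
    ∀ f, (∀ i, i ≤ (decodeA chars f i).2) ∧
         (∀ stop j, j ≤ (loopA chars stop f j).2) := by
  intro f
  induction f with
  | zero => constructor <;> intros <;> simp [decodeA, loopA]
  | succ f ih =>
    obtain ⟨ihd, ihl⟩ := ih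
    constructor
    · intro i
      simp only [decodeA]
      split
      · split
        · rcases h : decodeA chars f (i+1) with ⟨inner, j⟩
          have := ihd (i+1); rw [h] at this
          split <;> simp <;> omega
        · split
          · rcases h : loopA chars ')' f (i+1) with ⟨parts, j⟩
            have := ihl ')' (i+1); rw [h] at this
            simp; omega
          · split
            · rcases h : loopA chars '}' f (i+1) with ⟨parts, j⟩
              have := ihl '}' (i+1); rw [h] at this
              simp; omega
            · simp
      · simp
    · intro stop j
      simp only [loopA]
      split
      · split
        · simp
        · rcases h : decodeA chars f j with ⟨item, j'⟩
          rcases h2 : loopA chars stop f j' with ⟨rest, j''⟩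
          have h3 := ihd j; rw [h] at h3
          have h4 := ihl stop j'; rw [h2] at h4
          simp; omega
      · simp

lemma progressA (chars : List Char) (f i : Nat) (hi : i < chars.length) (hf : 0 < f) :
    i + 1 ≤ (decodeA chars f i).2 := by
  cases f with
  | zero => omega
  | succ f =>
    simp only [decodeA, dif_pos hi]
    split
    · rcases h : decodeA chars f (i+1) with ⟨inner, j⟩
      have := (monoA chars f).1 (i+1); rw [h] at this
      split <;> simp <;> omega
    · split
      · rcases h : loopA chars ')' f (i+1) with ⟨parts, j⟩
        have := (monoA chars f).2 ')' (i+1); rw [h] at this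
        simp; omega
      · split
        · rcases h : loopA chars '}' f (i+1) with ⟨parts, j⟩
          have := (monoA chars f).2 '}' (i+1); rw [h] at this
          simp; omega
        · simp

-- main simulation: the stack machine run from position i computes A's decode
-- of the next complete type and continues with it folded into the stack
lemma simAB (chars : List Char) :
    ∀ f,
      (∀ i st, 2 * (chars.length - i) + 1 ≤ f →
        (chars.length ≤ i → topA st) →
        (∀ _ : i < chars.length, CompatSt st (chars.getD i ' ')) →
        runB (chars.drop i) st
          = contB st (decodeA chars f i).1 (chars.drop (decodeA chars f i).2)) ∧
      (∀ j k ps rest stop,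
        ((k = '(' ∧ stop = ')') ∨ (k = '{' ∧ stop = '}')) →
        2 * (chars.length - j) + 2 ≤ f →
        runB (chars.drop j) ((k, ps) :: rest)
          = contB rest (groupB k (ps ++ (loopA chars stop f j).1))
              (chars.drop ((loopA chars stop f j).2 + 1))) := by
  intro f
  induction f with
  | zero => constructor <;> intros <;> omega
  | succ f ih =>
    obtain ⟨ihD, ihL⟩ := ih
    constructor
    · -- decode simulation
      intro i st hf htop hcomp
      by_cases hi : i < chars.length
      · have hdrop : chars.drop i = chars[i] :: chars.drop (i+1) :=
          List.drop_eq_getElem_cons hi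
        have hget : chars.getD i ' ' = chars[i] := List.getD_eq_getElem chars ' ' hi
        by_cases ha : chars[i] = 'a'
        · -- 'a': push an array frame and decode the inner type
          have hncl : ∀ k ps rest, st = (k, ps) :: rest →
              ¬ ((k = '(' ∧ 'a' = ')') ∨ (k = '{' ∧ 'a' = '}')) := by
            rintro k ps rest _ (⟨_, h2⟩ | ⟨_, h2⟩) <;> exact absurd h2 (by decide)
          have hcA : ∀ _ : i + 1 < chars.length,
              CompatSt (('a', []) :: st) (chars.getD (i+1) ' ') := by
            intro _ k ps rest h
            injection h with h1 _
            injection h1 with h3 _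
            subst h3
            rintro (⟨h5, _⟩ | ⟨h5, _⟩) <;> exact absurd h5 (by decide)
          rw [decodeA_a chars f i hi ha, hdrop, ha,
            runB_open 'a' _ st hncl (Or.inl rfl),
            ihD (i+1) (('a', []) :: st) (by omega) (fun _ => ⟨[], st, rfl⟩) hcA,
            contB_consA]
        · by_cases hp : chars[i] = '('
          · -- '(': push a struct frame and run the part loop
            have hncl : ∀ k ps rest, st = (k, ps) :: rest →
                ¬ ((k = '(' ∧ '(' = ')') ∨ (k = '{' ∧ '(' = '}')) := by
              rintro k ps rest _ (⟨_, h2⟩ | ⟨_, h2⟩) <;> exact absurd h2 (by decide)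
            rw [decodeA_paren chars f i hi hp, hdrop, hp,
              runB_open '(' _ st hncl (Or.inr (Or.inl rfl))]
            simpa using ihL (i+1) '(' [] st ')' (Or.inl ⟨rfl, rfl⟩) (by omega)
          · by_cases hb : chars[i] = '{'
            · -- '{': push a dict-entry frame and run the part loop
              have hncl : ∀ k ps rest, st = (k, ps) :: rest →
                  ¬ ((k = '(' ∧ '{' = ')') ∨ (k = '{' ∧ '{' = '}')) := by
                rintro k ps rest _ (⟨_, h2⟩ | ⟨_, h2⟩) <;> exact absurd h2 (by decide)
              rw [decodeA_brace chars f i hi hb, hdrop, hb,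
                runB_open '{' _ st hncl (Or.inr (Or.inr rfl))]
              simpa using ihL (i+1) '{' [] st '}' (Or.inr ⟨rfl, rfl⟩) (by omega)
            · -- plain character
              have hncl : ∀ k ps rest, st = (k, ps) :: rest →
                  ¬ ((k = '(' ∧ chars[i] = ')') ∨ (k = '{' ∧ chars[i] = '}')) := by
                intro k ps rest h
                have := hcomp hi k ps rest h
                rwa [hget] at this
              rw [decodeA_plain chars f i hi ha hp hb, hdrop,
                runB_plain chars[i] _ st hncl (by tauto)]
      · -- input exhausted: only 'a' frames can be on top; decode yields ""
        have hle : chars.length ≤ i := by omega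
        rw [decodeA_eof chars (f+1) i hle, List.drop_eq_nil_of_le hle]
        simpa using closeEOF_topA st (htop hle)
    · -- loop simulation
      intro j k ps rest stop hk hf
      have hka : ¬ k = 'a' := by rcases hk with ⟨rfl, _⟩ | ⟨rfl, _⟩ <;> decide
      by_cases hj : j < chars.length
      · have hdrop : chars.drop j = chars[j] :: chars.drop (j+1) :=
          List.drop_eq_getElem_cons hj
        have hget : chars.getD j ' ' = chars[j] := List.getD_eq_getElem chars ' ' hj
        by_cases hs : chars[j] = stop
        · -- the stop character closes the frame
          rw [loopA_stop chars stop f j hj hs, hdrop, hs,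
            runB_closer stop _ k ps rest (by
              rcases hk with ⟨rfl, rfl⟩ | ⟨rfl, rfl⟩
              · exact Or.inl ⟨rfl, rfl⟩
              · exact Or.inr ⟨rfl, rfl⟩)]
          simp
        · -- decode one part, fold it into the frame, continue the loop
          have hprog : j + 1 ≤ (decodeA chars f j).2 :=
            progressA chars f j hj (by omega)
          have hcompL : ∀ _ : j < chars.length,
              CompatSt ((k, ps) :: rest) (chars.getD j ' ') := by
            intro _ k0 ps0 rest0 h0
            injection h0 with h1 _
            injection h1 with h3 _
            subst h3
            rw [hget]
            rcases hk with ⟨rfl, rfl⟩ | ⟨rfl, rfl⟩ <;>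
              rintro (⟨h4, h5⟩ | ⟨h4, h5⟩) <;> first
                | exact hs h5
                | exact absurd h4 (by decide)
          rw [loopA_step chars stop f j hj hs,
            ihD j ((k, ps) :: rest) (by omega) (by intro h; omega) hcompL,
            contB_consGroup k hka,
            ihL (decodeA chars f j).2 k (ps ++ [(decodeA chars f j).1]) rest stop hk
              (by omega)]
          simp
      · -- input exhausted inside the loop: the machine closes the frame at EOF
        have hle : chars.length ≤ j := by omega
        rw [loopA_eof chars stop (f+1) j hle, List.drop_eq_nil_of_le hle,
          List.drop_eq_nil_of_le (by omega)]
        show closeEOF ((k, ps) :: rest) none = _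
        rw [show closeEOF ((k, ps) :: rest) none
              = closeEOF rest (some (groupB k (ps ++ []))) from by
            simp [closeEOF, hka], closeEOF_some]

lemma main_lemma (chars : List Char) (hne : chars ≠ []) :
    runB chars [] = (decodeA chars (2 * chars.length + 2) 0).1 := by
  have hlen : 0 < chars.length := List.length_pos_iff.mpr hne
  have hD := (simAB chars (2 * chars.length + 2)).1 0 [] (by omega)
      (by intro h; omega) (by intro _ k ps rest h; simp at h)
  simpa [contB, foldB] using hD

-- ===== VERDICT (by name: the statement is the Claim_ definition above) =====
theorem sig_to_human_spec : Claim_equal_sig_to_human := by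
  intro sig _
  unfold Spec_sig_to_human sig_to_human sig_to_human_alt
  by_cases h : sig = ""
  · simp [h]
  · have hne : sig.toList ≠ [] := by
      intro hl
      exact h (by rwa [String.toList_eq_nil_iff] at hl)
    rw [if_neg h, if_neg h, main_lemma sig.toList hne]
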